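-- pv_equiv track=rewrite | github.com/josetabuyo/NeuroFlow | backend/core/masks.py | _sparse_ring
-- ===== SOURCE A (Python) =====
-- def _sparse_ring(r_inner: int, r_outer: int, step: int = 2) -> list[tuple[int, int]]:
--     """Sparse annular ring: keeps only cells where (dx+dy) % step == 0.
--
--     step=2 gives ~50% density (checkerboard), step=3 gives ~33%, etc.
--     """
--     return [
--         (dx, dy)
--         for dx in range(-r_outer, r_outer + 1)
--         for dy in range(-r_outer, r_outer + 1)
--         if r_inner <= max(abs(dx), abs(dy)) <= r_outer
--         and (dx + dy) % step == 0
--     ]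
-- ===== SOURCE B (Python) =====
-- def _sparse_ring(r_inner: int, r_outer: int, step: int = 2) -> list[tuple[int, int]]:
--     """Same result as A, but skips the empty inner square: for rows with
--     abs(dx) < r_inner only the two dy intervals [-r_outer, -r_inner] and
--     [r_inner, r_outer] are visited instead of the whole row."""
--     out = []
--     for dx in range(-r_outer, r_outer + 1):
--         if r_inner <= abs(dx):
--             for dy in range(-r_outer, r_outer + 1):
--                 if (dx + dy) % step == 0:
--                     out.append((dx, dy))
--         else:
--             for dy in range(-r_outer, -r_inner + 1):
--                 if (dx + dy) % step == 0:
--                     out.append((dx, dy))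
--             for dy in range(r_inner, r_outer + 1):
--                 if (dx + dy) % step == 0:
--                     out.append((dx, dy))
--     return out
-- ===== Notes on version B (the rewrite author's own statement) =====
-- stated objective: alternative
-- what changed: B replaces A's full-square double comprehension (ring test on every cell) with an explicit loop that, for rows with |dx| < r_inner, visits only the two live dy intervals [-r_outer,-r_inner] and [r_inner,r_outer], skipping the empty inner square; the ring membership test disappears from the emitted cells.
import Mathlib
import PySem

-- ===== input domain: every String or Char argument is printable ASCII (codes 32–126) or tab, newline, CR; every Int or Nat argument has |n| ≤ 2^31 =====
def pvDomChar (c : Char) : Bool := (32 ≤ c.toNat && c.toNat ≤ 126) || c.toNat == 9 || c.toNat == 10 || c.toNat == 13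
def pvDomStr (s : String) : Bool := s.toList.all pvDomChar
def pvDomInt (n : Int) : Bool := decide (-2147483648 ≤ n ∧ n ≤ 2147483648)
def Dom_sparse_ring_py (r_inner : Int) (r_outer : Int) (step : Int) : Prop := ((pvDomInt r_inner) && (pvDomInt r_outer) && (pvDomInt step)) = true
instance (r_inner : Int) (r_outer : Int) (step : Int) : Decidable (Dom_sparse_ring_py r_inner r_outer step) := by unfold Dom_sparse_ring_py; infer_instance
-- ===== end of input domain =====

-- B enumerates the same sparse ring but skips the empty inner square row-segment
-- (for |dx| < r_inner only the two live dy intervals are visited): alternative traversal, same output.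

-- ===== PORT A =====
-- A is one list comprehension: for dx in range, for dy in range, keep (dx,dy) when
-- r_inner <= max(|dx|,|dy|) <= r_outer and (dx+dy) % step == 0.
def sparse_ring_py (r_inner : Int) (r_outer : Int) (step : Int) : List (Int × Int) :=
  (PySem.List.pyRange (-r_outer) (r_outer + 1) 1).flatMap (fun dx =>
    ((PySem.List.pyRange (-r_outer) (r_outer + 1) 1).filter (fun dy =>
        decide (r_inner ≤ max |dx| |dy|) && decide (max |dx| |dy| ≤ r_outer)
          && (PySem.Int.mod (dx + dy) step == 0))).map (fun dy => (dx, dy)))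

-- ===== PORT B =====
-- inner 'for dy in range(lo, hi): if (dx+dy) % step == 0: out.append((dx, dy))'
def pvEmit (step dx lo hi : Int) (out : List (Int × Int)) : List (Int × Int) :=
  (PySem.List.pyRange lo hi 1).foldl
    (fun o dy => if PySem.Int.mod (dx + dy) step == 0 then o ++ [(dx, dy)] else o) out

def sparse_ring_py_alt (r_inner : Int) (r_outer : Int) (step : Int) : List (Int × Int) :=
  (PySem.List.pyRange (-r_outer) (r_outer + 1) 1).foldl
    (fun out dx =>
      if r_inner ≤ |dx| then
        pvEmit step dx (-r_outer) (r_outer + 1) out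
      else
        pvEmit step dx r_inner (r_outer + 1) (pvEmit step dx (-r_outer) (-r_inner + 1) out))
    []

-- ===== PRECONDITION & SPEC =====
-- Pre_ excludes exactly the inputs where Python A raises ZeroDivisionError:
-- step = 0 while some cell satisfies the ring test (0 ≤ r_outer and r_inner ≤ r_outer),
-- so the short-circuited '%' is reached.  B raises there too.
def Pre_sparse_ring_py (r_inner : Int) (r_outer : Int) (step : Int) : Prop :=
  ¬ (step = 0 ∧ 0 ≤ r_outer ∧ r_inner ≤ r_outer)
instance (r_inner : Int) (r_outer : Int) (step : Int) : Decidable (Pre_sparse_ring_py r_inner r_outer step) := by unfold Pre_sparse_ring_py; infer_instance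

def pvWitness_sparse_ring_py : Int × Int × Int := (1, 3, 2)

def Spec_sparse_ring_py (r_inner : Int) (r_outer : Int) (step : Int) (out : List (Int × Int)) : Prop := out = sparse_ring_py_alt r_inner r_outer step
instance (r_inner : Int) (r_outer : Int) (step : Int) (out : List (Int × Int)) : Decidable (Spec_sparse_ring_py r_inner r_outer step out) := by unfold Spec_sparse_ring_py; infer_instance

-- ===== CLAIM (what is proved, stated in full; the proofs are below) =====
def Claim_equal_sparse_ring_py : Prop := ∀ (r_inner : Int) (r_outer : Int) (step : Int), Dom_sparse_ring_py r_inner r_outer step → Pre_sparse_ring_py r_inner r_outer step → Spec_sparse_ring_py r_inner r_outer step (sparse_ring_py r_inner r_outer step)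

-- ===== LEMMAS AND PROOFS =====

-- the inner loop is an append of a filtered, mapped range
theorem pvEmit_eq (step dx lo hi : Int) (out : List (Int × Int)) :
    pvEmit step dx lo hi out =
      out ++ ((PySem.List.pyRange lo hi 1).filter
        (fun dy => PySem.Int.mod (dx + dy) step == 0)).map (fun dy => (dx, dy)) :=
  PySem.List.foldl_append_if _ _ _ _

-- per-row agreement: A's filtered full row equals B's contribution for that dx
theorem pv_row_eq (r_inner r_outer step dx : Int)
    (h1 : -r_outer ≤ dx) (h2 : dx < r_outer + 1) :
    ((PySem.List.pyRange (-r_outer) (r_outer + 1) 1).filter (fun dy =>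
        decide (r_inner ≤ max |dx| |dy|) && decide (max |dx| |dy| ≤ r_outer)
          && (PySem.Int.mod (dx + dy) step == 0))).map (fun dy => (dx, dy)) =
      if r_inner ≤ |dx| then
        ((PySem.List.pyRange (-r_outer) (r_outer + 1) 1).filter
          (fun dy => PySem.Int.mod (dx + dy) step == 0)).map (fun dy => (dx, dy))
      else
        ((PySem.List.pyRange (-r_outer) (-r_inner + 1) 1).filter
          (fun dy => PySem.Int.mod (dx + dy) step == 0)).map (fun dy => (dx, dy)) ++
        ((PySem.List.pyRange r_inner (r_outer + 1) 1).filter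
          (fun dy => PySem.Int.mod (dx + dy) step == 0)).map (fun dy => (dx, dy)) := by
  have hdxabs : |dx| ≤ r_outer := abs_le.mpr ⟨h1, by omega⟩
  have hax : 0 ≤ |dx| := abs_nonneg dx
  by_cases hdx : r_inner ≤ |dx|
  · rw [if_pos hdx]
    congr 1
    apply List.filter_congr
    intro dy hdy
    rw [PySem.List.mem_pyRange_one] at hdy
    have hdyabs : |dy| ≤ r_outer := abs_le.mpr ⟨hdy.1, by omega⟩
    have c1 : r_inner ≤ max |dx| |dy| := le_trans hdx (le_max_left _ _)
    have c2 : max |dx| |dy| ≤ r_outer := max_le hdxabs hdyabs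
    simp [c1, c2]
  · rw [if_neg hdx]
    rw [not_le] at hdx
    by_cases hio : r_inner ≤ r_outer
    · rw [PySem.List.pyRange_one_append (-r_outer) (-r_inner + 1) (r_outer + 1)
          (by omega) (by omega),
        PySem.List.pyRange_one_append (-r_inner + 1) r_inner (r_outer + 1)
          (by omega) (by omega)]
      rw [List.filter_append, List.filter_append, List.map_append, List.map_append]
      have hmid : (PySem.List.pyRange (-r_inner + 1) r_inner 1).filter (fun dy =>
          decide (r_inner ≤ max |dx| |dy|) && decide (max |dx| |dy| ≤ r_outer)
            && (PySem.Int.mod (dx + dy) step == 0)) = [] := by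
        rw [List.filter_eq_nil_iff]
        intro dy hdy
        rw [PySem.List.mem_pyRange_one] at hdy
        have : |dy| < r_inner := abs_lt.mpr ⟨by omega, by omega⟩
        have : max |dx| |dy| < r_inner := max_lt hdx this
        simp [not_le.mpr this]
      rw [hmid]
      have hleft : (PySem.List.pyRange (-r_outer) (-r_inner + 1) 1).filter (fun dy =>
          decide (r_inner ≤ max |dx| |dy|) && decide (max |dx| |dy| ≤ r_outer)
            && (PySem.Int.mod (dx + dy) step == 0)) =
          (PySem.List.pyRange (-r_outer) (-r_inner + 1) 1).filter
            (fun dy => PySem.Int.mod (dx + dy) step == 0) := by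
        apply List.filter_congr
        intro dy hdy
        rw [PySem.List.mem_pyRange_one] at hdy
        have hdyabs : |dy| ≤ r_outer := abs_le.mpr ⟨hdy.1, by omega⟩
        have hri : r_inner ≤ |dy| := by
          have : dy ≤ -r_inner := by omega
          calc r_inner ≤ -dy := by omega
            _ ≤ |dy| := neg_le_abs dy
        have c1 : r_inner ≤ max |dx| |dy| := le_trans hri (le_max_right _ _)
        have c2 : max |dx| |dy| ≤ r_outer := max_le hdxabs hdyabs
        simp [c1, c2]
      have hright : (PySem.List.pyRange r_inner (r_outer + 1) 1).filter (fun dy =>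
          decide (r_inner ≤ max |dx| |dy|) && decide (max |dx| |dy| ≤ r_outer)
            && (PySem.Int.mod (dx + dy) step == 0)) =
          (PySem.List.pyRange r_inner (r_outer + 1) 1).filter
            (fun dy => PySem.Int.mod (dx + dy) step == 0) := by
        apply List.filter_congr
        intro dy hdy
        rw [PySem.List.mem_pyRange_one] at hdy
        have hdyabs : |dy| ≤ r_outer := abs_le.mpr ⟨by omega, by omega⟩
        have hri : r_inner ≤ |dy| := le_trans hdy.1 (le_abs_self dy)
        have c1 : r_inner ≤ max |dx| |dy| := le_trans hri (le_max_right _ _)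
        have c2 : max |dx| |dy| ≤ r_outer := max_le hdxabs hdyabs
        simp [c1, c2]
      rw [hleft, hright]
      simp
    · rw [not_le] at hio
      have hempty : (PySem.List.pyRange (-r_outer) (r_outer + 1) 1).filter (fun dy =>
          decide (r_inner ≤ max |dx| |dy|) && decide (max |dx| |dy| ≤ r_outer)
            && (PySem.Int.mod (dx + dy) step == 0)) = [] := by
        rw [List.filter_eq_nil_iff]
        intro dy hdy
        rw [PySem.List.mem_pyRange_one] at hdy
        have hdyabs : |dy| ≤ r_outer := abs_le.mpr ⟨hdy.1, by omega⟩
        have : max |dx| |dy| < r_inner := max_lt (by omega) (by omega)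
        simp [not_le.mpr this]
      rw [hempty, PySem.List.pyRange_one_eq_nil (a := -r_outer) (b := -r_inner + 1) (by omega),
        PySem.List.pyRange_one_eq_nil (a := r_inner) (b := r_outer + 1) (by omega)]
      simp

theorem pv_eq (r_inner r_outer step : Int) :
    sparse_ring_py r_inner r_outer step = sparse_ring_py_alt r_inner r_outer step := by
  unfold sparse_ring_py sparse_ring_py_alt
  rw [show ((PySem.List.pyRange (-r_outer) (r_outer + 1) 1).flatMap (fun dx =>
      ((PySem.List.pyRange (-r_outer) (r_outer + 1) 1).filter (fun dy =>
        decide (r_inner ≤ max |dx| |dy|) && decide (max |dx| |dy| ≤ r_outer)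
          && (PySem.Int.mod (dx + dy) step == 0))).map (fun dy => (dx, dy)))) =
    [] ++ ((PySem.List.pyRange (-r_outer) (r_outer + 1) 1).flatMap (fun dx =>
      ((PySem.List.pyRange (-r_outer) (r_outer + 1) 1).filter (fun dy =>
        decide (r_inner ≤ max |dx| |dy|) && decide (max |dx| |dy| ≤ r_outer)
          && (PySem.Int.mod (dx + dy) step == 0))).map (fun dy => (dx, dy)))) from (List.nil_append _).symm,
    ← PySem.List.foldl_append_eq_flatMap]
  apply PySem.List.foldl_congr_mem
  intro acc dx hdx
  rw [PySem.List.mem_pyRange_one] at hdx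
  rw [pv_row_eq r_inner r_outer step dx hdx.1 hdx.2]
  by_cases h : r_inner ≤ |dx|
  · rw [if_pos h, if_pos h, pvEmit_eq]
  · rw [if_neg h, if_neg h, pvEmit_eq, pvEmit_eq, List.append_assoc]

-- ===== VERDICT (by name: the statement is the Claim_ definition above) =====
theorem sparse_ring_py_spec : Claim_equal_sparse_ring_py := by
  intro r_inner r_outer step _ _
  unfold Spec_sparse_ring_py
  exact pv_eq r_inner r_outer step
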